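-- pv_equiv track=rewrite | github.com/lwehmeier/onnx2saml | sympy2saml.py | createSaml_rnnStates
-- ===== SOURCE A (Python) =====
-- def createSaml_rnnStates(h_ins, h_outs):
--     s=""
--     for i in range(len(h_ins)):
--         for j in range(len(h_ins[i])):
--             # create and initialise states
--             s+=str(h_ins[i][j])+" : [ 0.0 .. 1.0 ] init 0.0"+";\n"
--             # create update rules
--     s += "true ->"
--     for i in range(len(h_ins)):
--         for j in range(len(h_ins[i])):
--             s+=" ("+str(h_ins[i][j])+"' = "+str(h_outs[i][j])+") &"
--     return s[:-2]+"\n;"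
-- ===== SOURCE B (Python) =====
-- def createSaml_rnnStates(h_ins, h_outs):
--     states = []
--     rules = []
--     for ins_row, outs_row in zip(h_ins, h_outs):
--         for name, val in zip(ins_row, outs_row):
--             states.append(name + " : [ 0.0 .. 1.0 ] init 0.0;\n")
--             rules.append(" (" + name + "' = " + val + ") &")
--     body = "".join(states) + "true ->" + "".join(rules)
--     return body[:-2] + "\n;"
-- ===== Notes on version B (the rewrite author's own statement) =====
-- stated objective: alternative
-- what changed: A makes two separate index-driven passes (range(len(...)) with repeated subscripting into h_ins and h_outs) appending to one growing string; B makes a single zip-driven pass keeping two accumulator lists (state declarations and rule fragments) and joins them afterwards.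
-- outside the precondition, e.g. on createSaml_rnnStates([['a']], []): A raises IndexError, B returns 'true \n;'
import Mathlib
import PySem

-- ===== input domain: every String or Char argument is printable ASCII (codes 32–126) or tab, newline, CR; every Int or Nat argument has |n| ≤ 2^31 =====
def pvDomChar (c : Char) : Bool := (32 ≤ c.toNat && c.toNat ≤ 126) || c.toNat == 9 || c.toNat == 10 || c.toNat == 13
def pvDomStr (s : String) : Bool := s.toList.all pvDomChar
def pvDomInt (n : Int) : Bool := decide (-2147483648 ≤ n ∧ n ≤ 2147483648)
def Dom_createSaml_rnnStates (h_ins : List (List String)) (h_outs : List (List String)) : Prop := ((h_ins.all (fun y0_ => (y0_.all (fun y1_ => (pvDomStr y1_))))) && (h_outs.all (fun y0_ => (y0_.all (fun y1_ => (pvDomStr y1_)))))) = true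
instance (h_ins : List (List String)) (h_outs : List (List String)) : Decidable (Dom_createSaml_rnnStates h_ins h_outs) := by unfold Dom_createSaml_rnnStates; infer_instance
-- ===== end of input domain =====

-- B replaces A's two index-driven passes over the whole nested input by a single zip-driven pass
-- keeping two accumulator lists (state declarations, update-rule fragments), joined afterwards (objective: alternative decomposition).

-- ===== PORT A =====
-- A, transliterated: two nested index loops over range(len(...)) appending to one string accumulator,
-- then s[:-2] + "\n;". Strings are handled as List Char (Lean's own String.append is kernel-opaque);
-- out-of-range h_outs[i] / h_outs[i][j] (IndexError in Python) are pyGetD defaults, excluded by Pre_.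
def createSaml_rnnStates (h_ins : List (List String)) (h_outs : List (List String)) : String :=
  let s : List Char := (PySem.List.pyRange 0 (h_ins.length : Int) 1).foldl
    (fun s i =>
      (PySem.List.pyRange 0 ((PySem.List.pyGetD h_ins i []).length : Int) 1).foldl
        (fun s j => s ++ (PySem.List.pyGetD (PySem.List.pyGetD h_ins i []) j "").toList
                      ++ " : [ 0.0 .. 1.0 ] init 0.0".toList ++ ";\n".toList) s) []
  let s := s ++ "true ->".toList
  let s := (PySem.List.pyRange 0 (h_ins.length : Int) 1).foldl
    (fun s i =>
      (PySem.List.pyRange 0 ((PySem.List.pyGetD h_ins i []).length : Int) 1).foldl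
        (fun s j => s ++ " (".toList
                      ++ (PySem.List.pyGetD (PySem.List.pyGetD h_ins i []) j "").toList
                      ++ "' = ".toList
                      ++ (PySem.List.pyGetD (PySem.List.pyGetD h_outs i []) j "").toList
                      ++ ") &".toList) s) s
  String.ofList (PySem.List.slice s none (some (-2)) ++ "\n;".toList)

-- ===== PORT B =====
-- B, transliterated: one pass over zip(h_ins, h_outs) / zip(row_in, row_out) accumulating the pair
-- (states, rules) of fragment lists; "".join is List.flatten; then body[:-2] + "\n;".
def createSaml_rnnStates_alt (h_ins : List (List String)) (h_outs : List (List String)) : String :=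
  let sr : List (List Char) × List (List Char) :=
    (h_ins.zip h_outs).foldl (fun acc p =>
      (p.1.zip p.2).foldl (fun acc q =>
        (acc.1 ++ [q.1.toList ++ " : [ 0.0 .. 1.0 ] init 0.0;\n".toList],
         acc.2 ++ [" (".toList ++ q.1.toList ++ "' = ".toList ++ q.2.toList ++ ") &".toList])) acc)
      ([], [])
  let body := sr.1.flatten ++ "true ->".toList ++ sr.2.flatten
  String.ofList (PySem.List.slice body none (some (-2)) ++ "\n;".toList)

-- ===== PRECONDITION & SPEC =====
-- Pre_ is exactly A's return domain: A raises IndexError (reading h_outs[i] or h_outs[i][j]) iff some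
-- nonempty row h_ins[i] has no h_outs row of at least the same length at index i.
def Pre_createSaml_rnnStates (h_ins : List (List String)) (h_outs : List (List String)) : Prop :=
  ∀ i : Nat, i < h_ins.length → (h_ins.getD i []) ≠ [] →
    i < h_outs.length ∧ (h_ins.getD i []).length ≤ (h_outs.getD i []).length
instance (h_ins : List (List String)) (h_outs : List (List String)) : Decidable (Pre_createSaml_rnnStates h_ins h_outs) := by unfold Pre_createSaml_rnnStates; infer_instance
def pvWitness_createSaml_rnnStates : List (List String) × List (List String) :=
  ([["a", "b"], []], [["x", "y"], ["z"]])
def Spec_createSaml_rnnStates (h_ins : List (List String)) (h_outs : List (List String)) (out : String) : Prop := out = createSaml_rnnStates_alt h_ins h_outs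
instance (h_ins : List (List String)) (h_outs : List (List String)) (out : String) : Decidable (Spec_createSaml_rnnStates h_ins h_outs out) := by unfold Spec_createSaml_rnnStates; infer_instance

-- ===== CLAIM (what is proved, stated in full; the proofs are below) =====
def Claim_equal_createSaml_rnnStates : Prop := ∀ (h_ins : List (List String)) (h_outs : List (List String)), Dom_createSaml_rnnStates h_ins h_outs → Pre_createSaml_rnnStates h_ins h_outs → Spec_createSaml_rnnStates h_ins h_outs (createSaml_rnnStates h_ins h_outs)

-- ===== LEMMAS AND PROOFS =====

-- index-padded zip: (padZip d as bs)[i] = (as[i], bs[i] or d); length = as.length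
def pvPadZip {α β : Type} (d : β) : List α → List β → List (α × β)
  | [], _ => []
  | a :: as, [] => (a, d) :: pvPadZip d as []
  | a :: as, b :: bs => (a, b) :: pvPadZip d as bs

theorem pvMapIdx_eq_padZip {α β : Type} (ins : List α) (outs : List β) (da : α) (db : β) :
    (PySem.List.pyRange 0 (ins.length : Int) 1).map
      (fun i => (PySem.List.pyGetD ins i da, PySem.List.pyGetD outs i db))
    = pvPadZip db ins outs := by
  induction ins generalizing outs with
  | nil => simp [PySem.List.pyRange_one_eq_nil, pvPadZip]
  | cons a as ih =>
    have h : (PySem.List.pyRange 0 ((a :: as).length : Int) 1).map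
        (fun i => (PySem.List.pyGetD (a :: as) i da, PySem.List.pyGetD outs i db))
        = (a, PySem.List.pyGetD outs 0 db) ::
          (PySem.List.pyRange 0 (as.length : Int) 1).map
            (fun i => (PySem.List.pyGetD as i da, PySem.List.pyGetD outs.tail i db)) := by
      simp only [PySem.List.pyRange_zero_nat, List.map_map]
      rw [List.length_cons, List.range_succ_eq_map, List.map_cons, List.map_map]
      congr 1
      · simp
      · apply List.map_congr_left
        intro k _
        simp only [Function.comp_apply, PySem.List.pyGetD_natCast]
        cases outs <;> simp [Nat.succ_eq_add_one, List.getD]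
    cases outs with
    | nil =>
      simp only [List.tail_nil] at h
      rw [h, ih []]; simp [pvPadZip, PySem.List.pyGetD, PySem.List.pyGet?]
    | cons b bs =>
      simp only [List.tail_cons] at h
      rw [h, ih bs]
      simp [pvPadZip]
theorem pvFoldlIdxPair {α β γ : Type} (ins : List α) (outs : List β) (da : α) (db : β)
    (g : α → β → List γ) (init : List γ) :
    (PySem.List.pyRange 0 (ins.length : Int) 1).foldl
      (fun s i => s ++ g (PySem.List.pyGetD ins i da) (PySem.List.pyGetD outs i db)) init
    = init ++ (pvPadZip db ins outs).flatMap (fun p => g p.1 p.2) := by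
  have h1 := List.foldl_map (f := fun i : Int => (PySem.List.pyGetD ins i da, PySem.List.pyGetD outs i db))
    (g := fun (s : List γ) p => s ++ g p.1 p.2) (l := PySem.List.pyRange 0 (ins.length : Int) 1)
    (init := init)
  rw [pvMapIdx_eq_padZip] at h1
  exact h1.symm.trans (PySem.List.foldl_append_eq_flatMap _ _ _)

theorem pvPadZip_eq_zip_of_le {α β : Type} (d : β) (as : List α) (bs : List β)
    (h : as.length ≤ bs.length) : pvPadZip d as bs = as.zip bs := by
  induction as generalizing bs with
  | nil => simp [pvPadZip]
  | cons a as ih =>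
    cases bs with
    | nil => simp at h
    | cons b bs => simp [pvPadZip, List.zip_cons_cons, ih bs (by simpa using h)]

theorem pvPadZip_all_nil {α : Type} (g : String × String → List α)
    (as : List (List String)) (h : ∀ i : Nat, i < as.length → as.getD i [] = []) :
    (pvPadZip [] as ([] : List (List String))).flatMap
      (fun p => (pvPadZip "" p.1 p.2).flatMap g) = [] := by
  induction as with
  | nil => simp [pvPadZip]
  | cons a as ih =>
    have h0 : a = [] := by simpa [List.getD] using h 0 (by simp)
    simp only [pvPadZip, List.flatMap_cons, h0]
    rw [ih (fun i hi => by simpa [List.getD] using h (i + 1) (by simpa using hi))]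
    simp

-- the heart: under Pre_, the padded index traversal equals the zip traversal
theorem pvPadZip_eq_zip_flatMap {α : Type} (g : String × String → List α)
    (ins outs : List (List String)) (pre : Pre_createSaml_rnnStates ins outs) :
    (pvPadZip [] ins outs).flatMap (fun p => (pvPadZip "" p.1 p.2).flatMap g)
    = (ins.zip outs).flatMap (fun p => (p.1.zip p.2).flatMap g) := by
  induction ins generalizing outs with
  | nil => simp [pvPadZip]
  | cons a as ih =>
    cases outs with
    | nil =>
      have hz : (a :: as).zip ([] : List (List String)) = [] := by simp
      rw [hz]
      have h0 : a = [] := by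
        by_contra hne
        exact absurd ((pre 0 (by simp) (by simpa [List.getD] using hne)).1) (by simp)
      simp only [pvPadZip, List.flatMap_cons, h0]
      rw [pvPadZip_all_nil g as (fun i hi => by
        by_contra hne
        exact absurd ((pre (i + 1) (by simpa using hi) (by simpa [List.getD] using hne)).1)
          (by simp))]
      simp
    | cons b bs =>
      have hhead : (pvPadZip "" a b).flatMap g = (a.zip b).flatMap g := by
        by_cases ha : a = []
        · simp [ha, pvPadZip]
        · rw [pvPadZip_eq_zip_of_le "" a b
            (by simpa [List.getD] using (pre 0 (by simp) (by simpa [List.getD] using ha)).2)]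
      have htail := ih bs (fun i hi hne =>
        by simpa [List.getD] using pre (i + 1) (by simpa using hi) (by simpa [List.getD] using hne))
      simp only [pvPadZip, List.zip_cons_cons, List.flatMap_cons, hhead, htail]

-- B's two-accumulator folds, flattened
theorem pvFoldPairInner {γ : Type} (u v : γ → List Char) (l : List γ)
    (acc : List (List Char) × List (List Char)) :
    l.foldl (fun acc q => (acc.1 ++ [u q], acc.2 ++ [v q])) acc
    = (acc.1 ++ l.map u, acc.2 ++ l.map v) := by
  induction l generalizing acc with
  | nil => simp
  | cons x xs ih => simp [ih]

theorem pvFoldPairOuter {γ : Type} (U V : γ → List (List Char)) (l : List γ)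
    (acc : List (List Char) × List (List Char)) :
    l.foldl (fun acc p => (acc.1 ++ U p, acc.2 ++ V p)) acc
    = (acc.1 ++ l.flatMap U, acc.2 ++ l.flatMap V) := by
  induction l generalizing acc with
  | nil => simp
  | cons x xs ih => simp [ih]

theorem pvFlatten_flatMap {α γ : Type} (l : List α) (f : α → List (List γ)) :
    (l.flatMap f).flatten = l.flatMap (fun x => (f x).flatten) := by
  induction l with
  | nil => simp
  | cons x xs ih => simp [ih]

-- under Pre_, the state pass over h_ins alone equals the zip traversal reading only first components
theorem pvStates_eq {γ : Type} (u : String → List γ) (ins outs : List (List String))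
    (pre : Pre_createSaml_rnnStates ins outs) :
    (ins.zip outs).flatMap (fun p => (p.1.zip p.2).flatMap (fun q => u q.1))
    = ins.flatMap (fun r => r.flatMap u) := by
  induction ins generalizing outs with
  | nil => simp
  | cons a as ih =>
    cases outs with
    | nil =>
      have hall : ∀ i : Nat, i < (a :: as).length → (a :: as).getD i [] = [] := by
        intro i hi
        by_contra hne
        exact absurd ((pre i hi hne).1) (by simp)
      have : ∀ (l : List (List String)), (∀ i : Nat, i < l.length → l.getD i [] = []) →
          l.flatMap (fun r => r.flatMap u) = [] := by
        intro l
        induction l with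
        | nil => simp
        | cons x xs ihx =>
          intro h
          have hx : x = [] := by simpa [List.getD] using h 0 (by simp)
          simp only [List.flatMap_cons, hx, List.flatMap_nil, List.nil_append]
          exact ihx fun i hi => by simpa [List.getD] using h (i + 1) (by simpa using hi)
      simp [this (a :: as) hall]
    | cons b bs =>
      have hhead : (a.zip b).flatMap (fun q => u q.1) = a.flatMap u := by
        by_cases ha : a = []
        · simp [ha]
        · have hle : a.length ≤ b.length := by
            simpa [List.getD] using (pre 0 (by simp) (by simpa [List.getD] using ha)).2
          calc (a.zip b).flatMap (fun q => u q.1)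
              = ((a.zip b).map Prod.fst).flatMap u := by
                rw [List.flatMap_def, List.flatMap_def, List.map_map]; rfl
            _ = a.flatMap u := by rw [List.map_fst_zip hle]
      have htail := ih bs (fun i hi hne =>
        by simpa [List.getD] using pre (i + 1) (by simpa using hi) (by simpa [List.getD] using hne))
      simp only [List.zip_cons_cons, List.flatMap_cons, hhead, htail]

-- ===== VERDICT (by name: the statement is the Claim_ definition above) =====
theorem createSaml_rnnStates_spec : Claim_equal_createSaml_rnnStates := by
  intro h_ins h_outs _ pre
  unfold Spec_createSaml_rnnStates createSaml_rnnStates createSaml_rnnStates_alt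
  refine congrArg (fun l : List Char =>
    String.ofList (PySem.List.slice l none (some (-2)) ++ "\n;".toList)) ?_
  -- A, first loop: index fold → flatMap over rows
  have inner1 : ∀ (row : List String) (s : List Char),
      (PySem.List.pyRange 0 (row.length : Int) 1).foldl
        (fun s j => s ++ (PySem.List.pyGetD row j "").toList
                      ++ " : [ 0.0 .. 1.0 ] init 0.0".toList ++ ";\n".toList) s
      = s ++ row.flatMap (fun x => x.toList ++ " : [ 0.0 .. 1.0 ] init 0.0;\n".toList) := by
    intro row s
    have e := PySem.List.foldl_pyRange_zero_pyGetD' row ""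
      (fun (s : List Char) x => s ++ x.toList
        ++ " : [ 0.0 .. 1.0 ] init 0.0".toList ++ ";\n".toList) s
    refine e.trans ?_
    rw [show (fun (s : List Char) x => s ++ x.toList
          ++ " : [ 0.0 .. 1.0 ] init 0.0".toList ++ ";\n".toList)
        = (fun (s : List Char) (x : String) =>
            s ++ (x.toList ++ " : [ 0.0 .. 1.0 ] init 0.0;\n".toList)) from
      funext fun s => funext fun x => by
        simp only [List.append_assoc, List.append_cancel_left_eq]
        rfl]
    exact PySem.List.foldl_append_eq_flatMap _ _ _
  have loop1 :
      (PySem.List.pyRange 0 (h_ins.length : Int) 1).foldl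
        (fun s i =>
          (PySem.List.pyRange 0 ((PySem.List.pyGetD h_ins i []).length : Int) 1).foldl
            (fun s j => s ++ (PySem.List.pyGetD (PySem.List.pyGetD h_ins i []) j "").toList
                          ++ " : [ 0.0 .. 1.0 ] init 0.0".toList ++ ";\n".toList) s) []
      = h_ins.flatMap (fun r => r.flatMap
          (fun x => x.toList ++ " : [ 0.0 .. 1.0 ] init 0.0;\n".toList)) := by
    rw [show (fun (s : List Char) (i : Int) =>
          (PySem.List.pyRange 0 ((PySem.List.pyGetD h_ins i []).length : Int) 1).foldl
            (fun s j => s ++ (PySem.List.pyGetD (PySem.List.pyGetD h_ins i []) j "").toList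
                          ++ " : [ 0.0 .. 1.0 ] init 0.0".toList ++ ";\n".toList) s)
        = (fun (s : List Char) (i : Int) =>
            s ++ (PySem.List.pyGetD h_ins i []).flatMap
              (fun x => x.toList ++ " : [ 0.0 .. 1.0 ] init 0.0;\n".toList)) from
      funext fun s => funext fun i => inner1 _ s]
    have e := PySem.List.foldl_pyRange_zero_pyGetD' h_ins []
      (fun (s : List Char) (r : List String) => s ++ r.flatMap
        (fun x => x.toList ++ " : [ 0.0 .. 1.0 ] init 0.0;\n".toList)) []
    refine e.trans ?_
    simpa using PySem.List.foldl_append_eq_flatMap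
      (fun (r : List String) => r.flatMap
        (fun x => x.toList ++ " : [ 0.0 .. 1.0 ] init 0.0;\n".toList)) h_ins []
  -- A, second loop: index fold → padded-zip flatMap
  have inner2 : ∀ (r o : List String) (s : List Char),
      (PySem.List.pyRange 0 (r.length : Int) 1).foldl
        (fun s j => s ++ " (".toList ++ (PySem.List.pyGetD r j "").toList
                      ++ "\' = ".toList ++ (PySem.List.pyGetD o j "").toList ++ ") &".toList) s
      = s ++ (pvPadZip "" r o).flatMap
          (fun q => " (".toList ++ (q.1.toList ++ ("\' = ".toList ++ (q.2.toList ++ ") &".toList)))) := by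
    intro r o s
    have e := pvFoldlIdxPair r o "" ""
      (fun x y => " (".toList ++ (x.toList ++ ("\' = ".toList ++ (y.toList ++ ") &".toList)))) s
    refine Eq.trans ?_ e
    rw [show (fun (s : List Char) (j : Int) =>
          s ++ " (".toList ++ (PySem.List.pyGetD r j "").toList
            ++ "\' = ".toList ++ (PySem.List.pyGetD o j "").toList ++ ") &".toList)
        = (fun (s : List Char) (j : Int) =>
            s ++ (" (".toList ++ ((PySem.List.pyGetD r j "").toList
              ++ ("\' = ".toList ++ ((PySem.List.pyGetD o j "").toList ++ ") &".toList)))))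
        from funext fun s => funext fun j => by simp [List.append_assoc]]
  have loop2 : ∀ init : List Char,
      (PySem.List.pyRange 0 (h_ins.length : Int) 1).foldl
        (fun s i =>
          (PySem.List.pyRange 0 ((PySem.List.pyGetD h_ins i []).length : Int) 1).foldl
            (fun s j => s ++ " (".toList
                          ++ (PySem.List.pyGetD (PySem.List.pyGetD h_ins i []) j "").toList
                          ++ "\' = ".toList
                          ++ (PySem.List.pyGetD (PySem.List.pyGetD h_outs i []) j "").toList
                          ++ ") &".toList) s) init
      = init ++ (pvPadZip ([] : List String) h_ins h_outs).flatMap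
          (fun p => (pvPadZip "" p.1 p.2).flatMap
            (fun q => " (".toList ++ (q.1.toList ++ ("\' = ".toList ++ (q.2.toList ++ ") &".toList))))) := by
    intro init
    rw [show (fun (s : List Char) (i : Int) =>
          (PySem.List.pyRange 0 ((PySem.List.pyGetD h_ins i []).length : Int) 1).foldl
            (fun s j => s ++ " (".toList
                          ++ (PySem.List.pyGetD (PySem.List.pyGetD h_ins i []) j "").toList
                          ++ "\' = ".toList
                          ++ (PySem.List.pyGetD (PySem.List.pyGetD h_outs i []) j "").toList
                          ++ ") &".toList) s)
        = (fun (s : List Char) (i : Int) =>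
            s ++ (pvPadZip "" (PySem.List.pyGetD h_ins i []) (PySem.List.pyGetD h_outs i [])).flatMap
              (fun q => " (".toList ++ (q.1.toList ++ ("\' = ".toList ++ (q.2.toList ++ ") &".toList)))))
        from funext fun s => funext fun i => inner2 _ _ s]
    exact pvFoldlIdxPair h_ins h_outs [] []
      (fun r o => (pvPadZip "" r o).flatMap
        (fun q => " (".toList ++ (q.1.toList ++ ("\' = ".toList ++ (q.2.toList ++ ") &".toList))))) init
  -- B: collapse the pair folds
  have hb :
      ((h_ins.zip h_outs).foldl (fun acc p =>
        (p.1.zip p.2).foldl (fun acc q =>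
          (acc.1 ++ [q.1.toList ++ " : [ 0.0 .. 1.0 ] init 0.0;\n".toList],
           acc.2 ++ [" (".toList ++ q.1.toList ++ "\' = ".toList ++ q.2.toList ++ ") &".toList])) acc)
        (([], []) : List (List Char) × List (List Char)))
      = ((h_ins.zip h_outs).flatMap (fun p => (p.1.zip p.2).map
            (fun q => q.1.toList ++ " : [ 0.0 .. 1.0 ] init 0.0;\n".toList)),
         (h_ins.zip h_outs).flatMap (fun p => (p.1.zip p.2).map
            (fun q => " (".toList ++ q.1.toList ++ "\' = ".toList ++ q.2.toList ++ ") &".toList))) := by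
    rw [show (fun (acc : List (List Char) × List (List Char)) (p : List String × List String) =>
          (p.1.zip p.2).foldl (fun acc q =>
            (acc.1 ++ [q.1.toList ++ " : [ 0.0 .. 1.0 ] init 0.0;\n".toList],
             acc.2 ++ [" (".toList ++ q.1.toList ++ "\' = ".toList ++ q.2.toList ++ ") &".toList])) acc)
        = (fun acc p => (acc.1 ++ (p.1.zip p.2).map
            (fun q => q.1.toList ++ " : [ 0.0 .. 1.0 ] init 0.0;\n".toList),
          acc.2 ++ (p.1.zip p.2).map
            (fun q => " (".toList ++ q.1.toList ++ "\' = ".toList ++ q.2.toList ++ ") &".toList)))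
        from funext fun acc => funext fun p => pvFoldPairInner _ _ _ acc]
    simpa using pvFoldPairOuter _ _ (h_ins.zip h_outs) ([], [])
  show (PySem.List.pyRange 0 (h_ins.length : Int) 1).foldl _
      (((PySem.List.pyRange 0 (h_ins.length : Int) 1).foldl _ []) ++ "true ->".toList) = _
  rw [loop2, loop1, hb]
  rw [pvPadZip_eq_zip_flatMap
      (fun q => " (".toList ++ (q.1.toList ++ ("\' = ".toList ++ (q.2.toList ++ ") &".toList))))
      h_ins h_outs pre]
  rw [← pvStates_eq (fun x => x.toList ++ " : [ 0.0 .. 1.0 ] init 0.0;\n".toList) h_ins h_outs pre]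
  simp only [pvFlatten_flatMap, ← List.flatMap_def, List.append_assoc]
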